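-- pv_equiv track=rewrite | github.com/BenjaminRogersSeng/AdventOfCode2024 | 4/crossword_checker.py | flatten_slices
-- ===== SOURCE A (Python) =====
-- def flatten_slices(matrix):
--     n = len(matrix)       # Number of rows
--     m = len(matrix[0])    # Number of columns
--
--     result = []
--
--     # Horizontal slices (rows)
--     for row in matrix:
--         row = list(row)
--         result.append(row)
--
--     # Vertical slices (columns)
--     for col in range(m):
--         result.append([matrix[row][col] for row in range(n)])
--
--     # Main diagonals
--     for d in range(n + m - 1):
--         diagonal = []
--         for row in range(n):
--             col = d - row
--             if 0 <= col < m: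
--                 diagonal.append(matrix[row][col])
--         if diagonal:
--             result.append(diagonal)
--
--     # Anti-diagonals
--     for d in range(-(n - 1), m):
--         anti_diagonal = []
--         for row in range(n):
--             col = row + d
--             if 0 <= col < m:
--                 anti_diagonal.append(matrix[row][col])
--         if anti_diagonal:
--             result.append(anti_diagonal)
--
--
--     return result
-- ===== SOURCE B (Python) =====
-- def flatten_slices(matrix):
--     n = len(matrix)
--     m = len(matrix[0])
--
--     # One pass over the cells: drop each cell into its column, diagonal and
--     # anti-diagonal bucket (diagonal key r+c, anti-diagonal key (n-1-r)+c).
--     cols = [[] for _ in range(m)]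
--     diags = [[] for _ in range(n + m - 1)]
--     antis = [[] for _ in range(n + m - 1)]
--     for r in range(n):
--         row = matrix[r]
--         for c in range(m):
--             v = row[c]
--             cols[c].append(v)
--             diags[r + c].append(v)
--             antis[n - 1 - r + c].append(v)
--
--     return ([list(row) for row in matrix] + cols
--             + [b for b in diags if b] + [b for b in antis if b])
-- ===== Notes on version B (the rewrite author's own statement) =====
-- stated objective: alternative
-- what changed: B makes a single pass over the matrix cells, distributing each cell into per-column, per-diagonal (key r+c) and per-anti-diagonal (key n-1-r+c) buckets built once, then concatenates rows, columns and the nonempty buckets; A instead makes four staged scans and rescans all n rows for every one of the n+m-1 diagonals and anti-diagonals.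
import Mathlib
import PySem

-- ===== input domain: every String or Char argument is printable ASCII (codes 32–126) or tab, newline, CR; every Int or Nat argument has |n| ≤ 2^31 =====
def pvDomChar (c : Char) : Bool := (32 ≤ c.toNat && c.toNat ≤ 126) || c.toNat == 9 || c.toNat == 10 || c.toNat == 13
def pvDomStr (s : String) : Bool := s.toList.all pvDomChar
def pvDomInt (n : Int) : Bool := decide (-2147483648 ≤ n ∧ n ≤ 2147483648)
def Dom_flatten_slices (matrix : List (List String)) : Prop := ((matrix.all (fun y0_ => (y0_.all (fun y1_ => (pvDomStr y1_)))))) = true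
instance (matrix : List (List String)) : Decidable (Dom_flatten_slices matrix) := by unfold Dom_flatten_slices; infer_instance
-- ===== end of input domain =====

-- B replaces A's four staged scans (which rescan all n rows for each of the n+m-1 diagonals and
-- anti-diagonals) by ONE pass over the cells that distributes each cell into per-column,
-- per-diagonal (key r+c) and per-anti-diagonal (key n-1-r+c) buckets (objective: alternative).

-- ===== PORT A =====
-- Literal transliteration of A.  matrix[row] for row ∈ range(n) is in-range whenever row < n,
-- ported as List.getD (exact there); matrix[row][col] with an Int col is PySem.List.pyGetD
-- (under Pre_ every executed index is in range, so the default is never read).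
-- A-side helpers: the inner 'for row in range(n)' loops of the diagonal passes.
def diagLoopA (matrix : List (List String)) (n m : Nat) (d : Int) : List String :=
  (List.range n).foldl (fun dg (row : Nat) =>
    let col : Int := d - (row : Int)
    if 0 ≤ col ∧ col < (m : Int) then
      dg ++ [PySem.List.pyGetD (matrix.getD row []) col ""]
    else dg) []

def antiLoopA (matrix : List (List String)) (n m : Nat) (d : Int) : List String :=
  (List.range n).foldl (fun dg (row : Nat) =>
    let col : Int := (row : Int) + d
    if 0 ≤ col ∧ col < (m : Int) then
      dg ++ [PySem.List.pyGetD (matrix.getD row []) col ""]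
    else dg) []

def flatten_slices (matrix : List (List String)) : List (List String) :=
  let n := matrix.length
  let m := matrix.headI.length          -- len(matrix[0]); Pre_ excludes the empty matrix
  -- rows (row = list(row) copies the row; same value)
  let res1 := matrix.foldl (fun acc row => acc ++ [row]) []
  -- columns
  let res2 := (List.range m).foldl (fun acc col =>
      acc ++ [(List.range n).map (fun row => (matrix.getD row []).getD col "")]) res1
  -- main diagonals
  let res3 := (List.range (n + m - 1)).foldl (fun acc (d : Nat) =>
      let diagonal := diagLoopA matrix n m (d : Int)
      if diagonal ≠ [] then acc ++ [diagonal] else acc) res2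
  -- anti-diagonals: for d in range(-(n - 1), m)
  (PySem.List.pyRange (-((n : Int) - 1)) (m : Int) 1).foldl (fun acc (d : Int) =>
      let anti := antiLoopA matrix n m d
      if anti ≠ [] then acc ++ [anti] else acc) res3

-- ===== PORT B =====
-- Literal transliteration of Source B.  The mutable bucket lists become functional updates
-- (bucketPush = bs[k].append(v)); every pushed index is < bs.length, where set is exact.
-- row[c] with c < m ≤ len(row) under Pre_ is List.getD (exact there).
def bucketPush (bs : List (List String)) (k : Nat) (v : String) : List (List String) :=
  bs.set k (bs.getD k [] ++ [v])

-- the body of B's inner 'for c in range(m)' loop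
def cellStep (n r : Nat) (row : List String)
    (st : List (List String) × List (List String) × List (List String)) (c : Nat) :
    List (List String) × List (List String) × List (List String) :=
  let v := row.getD c ""
  (bucketPush st.1 c v, bucketPush st.2.1 (r + c) v, bucketPush st.2.2 (n - 1 - r + c) v)

-- the body of B's outer 'for r in range(n)' loop
def rowPass (n m : Nat) (matrix : List (List String))
    (st : List (List String) × List (List String) × List (List String)) (r : Nat) :
    List (List String) × List (List String) × List (List String) :=
  (List.range m).foldl (cellStep n r (matrix.getD r [])) st

def flatten_slices_alt (matrix : List (List String)) : List (List String) :=
  let n := matrix.length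
  let m := matrix.headI.length
  let st := (List.range n).foldl (rowPass n m matrix)
    (List.replicate m [], List.replicate (n + m - 1) [], List.replicate (n + m - 1) [])
  matrix.map (fun row => row) ++ st.1
    ++ st.2.1.filter (fun b => b ≠ []) ++ st.2.2.filter (fun b => b ≠ [])

-- ===== PRECONDITION & SPEC =====
-- Pre_ is exactly where Python A returns: a nonempty matrix (len(matrix[0]) raises IndexError on an
-- empty matrix) whose rows all have at least len(matrix[0]) entries (shorter rows raise IndexError
-- in the column pass).
def Pre_flatten_slices (matrix : List (List String)) : Prop :=
  matrix ≠ [] ∧ ∀ row ∈ matrix, matrix.headI.length ≤ row.length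
instance (matrix : List (List String)) : Decidable (Pre_flatten_slices matrix) := by
  unfold Pre_flatten_slices; infer_instance
def pvWitness_flatten_slices : List (List String) := [["a", "b"], ["c", "d"]]
def Spec_flatten_slices (matrix : List (List String)) (out : List (List String)) : Prop := out = flatten_slices_alt matrix
instance (matrix : List (List String)) (out : List (List String)) : Decidable (Spec_flatten_slices matrix out) := by unfold Spec_flatten_slices; infer_instance

-- ===== CLAIM (what is proved, stated in full; the proofs are below) =====
def Claim_equal_flatten_slices : Prop := ∀ (matrix : List (List String)), Dom_flatten_slices matrix → Pre_flatten_slices matrix → Spec_flatten_slices matrix (flatten_slices matrix)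

-- ===== LEMMAS AND PROOFS =====

-- proof-layer characterisations of the bucket contents
def colC (matrix : List (List String)) (r0 c : Nat) : List String :=
  (List.range r0).map (fun r => (matrix.getD r []).getD c "")

def diagC (matrix : List (List String)) (m r0 k : Nat) : List String :=
  (List.range r0).foldl (fun acc r =>
    if r ≤ k ∧ k < r + m then acc ++ [(matrix.getD r []).getD (k - r) ""] else acc) []

def antiC (matrix : List (List String)) (n m r0 k : Nat) : List String :=
  (List.range r0).foldl (fun acc r =>
    if n - 1 - r ≤ k ∧ k < n - 1 - r + m then
      acc ++ [(matrix.getD r []).getD (k - (n - 1 - r)) ""] else acc) []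

theorem length_bucketPush (bs : List (List String)) (k : Nat) (v : String) :
    (bucketPush bs k v).length = bs.length := by
  simp [bucketPush]

theorem getD_bucketPush_self (bs : List (List String)) (k : Nat) (v : String)
    (h : k < bs.length) : (bucketPush bs k v).getD k [] = bs.getD k [] ++ [v] := by
  simp [bucketPush, List.getD_eq_getElem?_getD, h]

theorem getD_bucketPush_ne (bs : List (List String)) (k j : Nat) (v : String)
    (h : j ≠ k) : (bucketPush bs k v).getD j [] = bs.getD j [] := by
  simp [bucketPush, List.getD_eq_getElem?_getD, List.getElem?_set_ne (Ne.symm h)]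

-- one row of B's pass: each bucket touched by row r gains exactly its cell, in order
theorem inner_spec (n m r : Nat) (row : List String) (hr : r < n) (hm : 0 < m) :
    ∀ (j : Nat), j ≤ m →
    ∀ (st : List (List String) × List (List String) × List (List String)),
    st.1.length = m → st.2.1.length = n + m - 1 → st.2.2.length = n + m - 1 →
    ((List.range j).foldl (cellStep n r row) st).1.length = m ∧
    ((List.range j).foldl (cellStep n r row) st).2.1.length = n + m - 1 ∧
    ((List.range j).foldl (cellStep n r row) st).2.2.length = n + m - 1 ∧
    (∀ c, ((List.range j).foldl (cellStep n r row) st).1.getD c []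
        = st.1.getD c [] ++ if c < j then [row.getD c ""] else []) ∧
    (∀ k, ((List.range j).foldl (cellStep n r row) st).2.1.getD k []
        = st.2.1.getD k [] ++ if r ≤ k ∧ k < r + j then [row.getD (k - r) ""] else []) ∧
    (∀ k, ((List.range j).foldl (cellStep n r row) st).2.2.getD k []
        = st.2.2.getD k [] ++ if n - 1 - r ≤ k ∧ k < n - 1 - r + j then
            [row.getD (k - (n - 1 - r)) ""] else []) := by
  intro j
  induction j with
  | zero =>
    intro _ st h1 h2 h3
    simp only [List.range_zero, List.foldl_nil]
    refine ⟨h1, h2, h3, ?_, ?_, ?_⟩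
    · intro c; rw [if_neg (by omega)]; simp
    · intro k; rw [if_neg (by omega)]; simp
    · intro k; rw [if_neg (by omega)]; simp
  | succ j ih =>
    intro hj st h1 h2 h3
    obtain ⟨l1, l2, l3, hc, hd, ha⟩ := ih (by omega) st h1 h2 h3
    rw [List.range_succ, List.foldl_append, List.foldl_cons, List.foldl_nil]
    refine ⟨?_, ?_, ?_, ?_, ?_, ?_⟩
    · simp [cellStep, length_bucketPush, l1]
    · simp [cellStep, length_bucketPush, l2]
    · simp [cellStep, length_bucketPush, l3]
    · intro c
      show (bucketPush _ j _).getD c [] = _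
      by_cases hcj : c = j
      · subst hcj
        rw [getD_bucketPush_self _ _ _ (by rw [l1]; omega), hc c,
          if_neg (by omega), if_pos (by omega)]
        simp
      · rw [getD_bucketPush_ne _ _ _ _ hcj, hc c]
        by_cases hlt : c < j
        · rw [if_pos hlt, if_pos (by omega)]
        · rw [if_neg hlt, if_neg (by omega)]
    · intro k
      show (bucketPush _ (r + j) _).getD k [] = _
      by_cases hkj : k = r + j
      · subst hkj
        rw [getD_bucketPush_self _ _ _ (by rw [l2]; omega), hd (r + j),
          if_neg (by omega), if_pos (by omega)]
        have h4 : r + j - r = j := by omega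
        rw [h4]
        simp
      · rw [getD_bucketPush_ne _ _ _ _ hkj, hd k]
        by_cases hlt : r ≤ k ∧ k < r + j
        · rw [if_pos hlt, if_pos (by omega)]
        · rw [if_neg hlt, if_neg (by omega)]
    · intro k
      show (bucketPush _ (n - 1 - r + j) _).getD k [] = _
      by_cases hkj : k = n - 1 - r + j
      · subst hkj
        rw [getD_bucketPush_self _ _ _ (by rw [l3]; omega), ha (n - 1 - r + j),
          if_neg (by omega), if_pos (by omega)]
        have h4 : n - 1 - r + j - (n - 1 - r) = j := by omega
        rw [h4]
        simp
      · rw [getD_bucketPush_ne _ _ _ _ hkj, ha k]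
        by_cases hlt : n - 1 - r ≤ k ∧ k < n - 1 - r + j
        · rw [if_pos hlt, if_pos (by omega)]
        · rw [if_neg hlt, if_neg (by omega)]

-- the whole pass: bucket contents after processing rows 0..r0-1
theorem outer_spec (matrix : List (List String)) (n m : Nat) (hm : 0 < m) :
    ∀ (r0 : Nat), r0 ≤ n →
    ((List.range r0).foldl (rowPass n m matrix)
      (List.replicate m [], List.replicate (n + m - 1) [], List.replicate (n + m - 1) [])).1.length = m ∧
    ((List.range r0).foldl (rowPass n m matrix)
      (List.replicate m [], List.replicate (n + m - 1) [], List.replicate (n + m - 1) [])).2.1.length = n + m - 1 ∧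
    ((List.range r0).foldl (rowPass n m matrix)
      (List.replicate m [], List.replicate (n + m - 1) [], List.replicate (n + m - 1) [])).2.2.length = n + m - 1 ∧
    (∀ c, c < m → ((List.range r0).foldl (rowPass n m matrix)
      (List.replicate m [], List.replicate (n + m - 1) [], List.replicate (n + m - 1) [])).1.getD c []
        = colC matrix r0 c) ∧
    (∀ k, k < n + m - 1 → ((List.range r0).foldl (rowPass n m matrix)
      (List.replicate m [], List.replicate (n + m - 1) [], List.replicate (n + m - 1) [])).2.1.getD k []
        = diagC matrix m r0 k) ∧
    (∀ k, k < n + m - 1 → ((List.range r0).foldl (rowPass n m matrix)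
      (List.replicate m [], List.replicate (n + m - 1) [], List.replicate (n + m - 1) [])).2.2.getD k []
        = antiC matrix n m r0 k) := by
  intro r0
  induction r0 with
  | zero =>
    intro _
    simp only [List.range_zero, List.foldl_nil]
    refine ⟨by simp, by simp, by simp, ?_, ?_, ?_⟩
    · intro c _
      simp [colC, List.getD_eq_getElem?_getD, List.getElem?_replicate]
      split <;> rfl
    · intro k _
      simp [diagC, List.getD_eq_getElem?_getD, List.getElem?_replicate]
      split <;> rfl
    · intro k _
      simp [antiC, List.getD_eq_getElem?_getD, List.getElem?_replicate]
      split <;> rfl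
  | succ r0 ih =>
    intro hr0
    obtain ⟨l1, l2, l3, hc, hd, ha⟩ := ih (by omega)
    rw [List.range_succ, List.foldl_append, List.foldl_cons, List.foldl_nil]
    obtain ⟨L1, L2, L3, C, D, A⟩ := inner_spec n m r0 (matrix.getD r0 []) (by omega) hm m
      (le_refl m) _ l1 l2 l3
    refine ⟨L1, L2, L3, ?_, ?_, ?_⟩
    · intro c hcm
      simp only [rowPass]
      rw [C c, hc c hcm, if_pos hcm]
      simp [colC, List.range_succ]
    · intro k hk
      simp only [rowPass]
      rw [D k, hd k hk]
      have h4 : diagC matrix m (r0 + 1) k = diagC matrix m r0 k ++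
          (if r0 ≤ k ∧ k < r0 + m then [(matrix.getD r0 []).getD (k - r0) ""] else []) := by
        unfold diagC
        rw [List.range_succ, List.foldl_append, List.foldl_cons, List.foldl_nil]
        by_cases g : r0 ≤ k ∧ k < r0 + m
        · rw [if_pos g, if_pos g]
        · rw [if_neg g, if_neg g]; simp
      rw [h4]
    · intro k hk
      simp only [rowPass]
      rw [A k, ha k hk]
      have h4 : antiC matrix n m (r0 + 1) k = antiC matrix n m r0 k ++
          (if n - 1 - r0 ≤ k ∧ k < n - 1 - r0 + m then
            [(matrix.getD r0 []).getD (k - (n - 1 - r0)) ""] else []) := by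
        unfold antiC
        rw [List.range_succ, List.foldl_append, List.foldl_cons, List.foldl_nil]
        by_cases g : n - 1 - r0 ≤ k ∧ k < n - 1 - r0 + m
        · rw [if_pos g, if_pos g]
        · rw [if_neg g, if_neg g]; simp
      rw [h4]

-- A's guarded scan of range n equals the map over the clamped index interval [a, b).
theorem foldl_filter_range {α : Type} (f : Nat → α) (P : Nat → Prop) [DecidablePred P] :
    ∀ (n a b : Nat), b ≤ n → (∀ r, r < n → (P r ↔ a ≤ r ∧ r < b)) →
    (List.range n).foldl (fun dg r => if P r then dg ++ [f r] else dg) []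
      = (List.range' a (b - a)).map f := by
  intro n
  induction n with
  | zero =>
    intro a b hb _
    have hb0 : b = 0 := Nat.le_zero.mp hb
    simp [hb0]
  | succ n ih =>
    intro a b hb hP
    rw [List.range_succ, List.foldl_append, List.foldl_cons, List.foldl_nil]
    by_cases hbn : b ≤ n
    · rw [ih a b hbn (fun r hr => hP r (by omega))]
      rw [if_neg]
      intro hPn
      exact absurd ((hP n (by omega)).mp hPn).2 (by omega)
    · have hb1 : b = n + 1 := by omega
      subst hb1
      have step := ih a n (le_refl n) (fun r hr => by
        rw [hP r (by omega)]; omega)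
      rw [step]
      by_cases han : a ≤ n
      · rw [if_pos ((hP n (by omega)).mpr ⟨han, by omega⟩)]
        have h1 : n + 1 - a = (n - a) + 1 := by omega
        rw [h1, List.range'_concat, List.map_append]
        have h2 : a + 1 * (n - a) = n := by omega
        rw [h2]; simp
      · rw [if_neg (fun hPn => han ((hP n (by omega)).mp hPn).1)]
        have h1 : n + 1 - a = 0 := by omega
        have h2 : n - a = 0 := by omega
        rw [h1, h2]

-- A's main-diagonal scan equals B's bucket content.
theorem diagLoopA_eq_diagC (matrix : List (List String)) (n m k : Nat) :
    diagLoopA matrix n m (k : Int) = diagC matrix m n k := by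
  unfold diagLoopA diagC
  rw [foldl_filter_range
    (fun r => PySem.List.pyGetD (matrix.getD r []) ((k : Int) - (r : Int)) "")
    (fun r => 0 ≤ (k : Int) - (r : Int) ∧ (k : Int) - (r : Int) < (m : Int))
    n (k + 1 - m) (min (k + 1) n) (by omega) (by intro r hr; omega)]
  rw [foldl_filter_range
    (fun r => (matrix.getD r []).getD (k - r) "")
    (fun r => r ≤ k ∧ k < r + m)
    n (k + 1 - m) (min (k + 1) n) (by omega) (by intro r hr; omega)]
  apply List.map_congr_left
  intro r hr
  rw [List.mem_range'_1] at hr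
  have h1 : (k : Int) - (r : Int) = ((k - r : Nat) : Int) := by omega
  rw [h1, PySem.List.pyGetD_natCast]

-- A's anti-diagonal scan (loop variable d = -(n-1) + j) equals B's bucket content.
theorem antiLoopA_eq_antiC (matrix : List (List String)) (n m k : Nat) :
    antiLoopA matrix n m (-((n : Int) - 1) + 1 * (k : Int)) = antiC matrix n m n k := by
  unfold antiLoopA antiC
  rw [foldl_filter_range
    (fun r => PySem.List.pyGetD (matrix.getD r [])
      ((r : Int) + (-((n : Int) - 1) + 1 * (k : Int))) "")
    (fun r => 0 ≤ (r : Int) + (-((n : Int) - 1) + 1 * (k : Int)) ∧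
      (r : Int) + (-((n : Int) - 1) + 1 * (k : Int)) < (m : Int))
    n (n - 1 - k) (min n (n + m - 1 - k)) (by omega) (by intro r hr; omega)]
  rw [foldl_filter_range
    (fun r => (matrix.getD r []).getD (k - (n - 1 - r)) "")
    (fun r => n - 1 - r ≤ k ∧ k < n - 1 - r + m)
    n (n - 1 - k) (min n (n + m - 1 - k)) (by omega) (by intro r hr; omega)]
  apply List.map_congr_left
  intro r hr
  rw [List.mem_range'_1] at hr
  have h1 : (r : Int) + (-((n : Int) - 1) + 1 * (k : Int)) = ((k - (n - 1 - r) : Nat) : Int) := by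
    omega
  rw [h1, PySem.List.pyGetD_natCast]

theorem diagC_ne_nil (matrix : List (List String)) (n m k : Nat)
    (hn : 0 < n) (hm : 0 < m) (hk : k < n + m - 1) : diagC matrix m n k ≠ [] := by
  unfold diagC
  rw [foldl_filter_range
    (fun r => (matrix.getD r []).getD (k - r) "")
    (fun r => r ≤ k ∧ k < r + m)
    n (k + 1 - m) (min (k + 1) n) (by omega) (by intro r hr; omega)]
  simp only [ne_eq, List.map_eq_nil_iff, List.range'_eq_nil_iff]
  omega

theorem antiC_ne_nil (matrix : List (List String)) (n m k : Nat)
    (hn : 0 < n) (hm : 0 < m) (hk : k < n + m - 1) : antiC matrix n m n k ≠ [] := by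
  unfold antiC
  rw [foldl_filter_range
    (fun r => (matrix.getD r []).getD (k - (n - 1 - r)) "")
    (fun r => n - 1 - r ≤ k ∧ k < n - 1 - r + m)
    n (n - 1 - k) (min n (n + m - 1 - k)) (by omega) (by intro r hr; omega)]
  simp only [ne_eq, List.map_eq_nil_iff, List.range'_eq_nil_iff]
  omega

-- With zero columns both of A's diagonal scans collect nothing.
theorem diagLoopA_zero (matrix : List (List String)) (n : Nat) (d : Int) :
    diagLoopA matrix n 0 d = [] := by
  unfold diagLoopA
  have h := foldl_filter_range
    (fun r => PySem.List.pyGetD (matrix.getD r []) (d - (r : Int)) "")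
    (fun r => 0 ≤ d - (r : Int) ∧ d - (r : Int) < ((0 : Nat) : Int))
    n 0 0 (by omega) (by intro r hr; omega)
  simpa using h

theorem antiLoopA_zero (matrix : List (List String)) (n : Nat) (d : Int) :
    antiLoopA matrix n 0 d = [] := by
  unfold antiLoopA
  have h := foldl_filter_range
    (fun r => PySem.List.pyGetD (matrix.getD r []) ((r : Int) + d) "")
    (fun r => 0 ≤ (r : Int) + d ∧ (r : Int) + d < ((0 : Nat) : Int))
    n 0 0 (by omega) (by intro r hr; omega)
  simpa using h

-- Length of A's anti-diagonal index range range(-(n-1), m).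
theorem pyRange_anti (n m : Nat) (hn : 0 < n) (hm : 0 < m) :
    PySem.List.pyRange (-((n : Int) - 1)) (m : Int) 1
      = (List.range (n + m - 1)).map (fun (k : Nat) => -((n : Int) - 1) + 1 * (k : Int)) := by
  rw [PySem.List.pyRange_of_pos _ _ (by omega : (0:Int) < 1)]
  have hlen : (if -((n : Int) - 1) < (m : Int)
      then (((m : Int) - -((n : Int) - 1) + 1 - 1) / 1).toNat else 0) = n + m - 1 := by
    rw [if_pos (by omega), Int.ediv_one]
    omega
  rw [hlen]

-- rebuild a bucket list from its pointwise contents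
theorem list_eq_map_range (ls : List (List String)) (L : Nat) (f : Nat → List String)
    (hl : ls.length = L) (h : ∀ k, k < L → ls.getD k [] = f k) :
    ls = (List.range L).map f := by
  apply List.ext_getElem (by simp [hl])
  intro i h1 h2
  have h3 : i < L := by omega
  rw [List.getElem_map, List.getElem_range]
  rw [← List.getD_eq_getElem ls [] h1]
  exact h i h3

theorem flatten_slices_eq (matrix : List (List String)) :
    flatten_slices matrix = flatten_slices_alt matrix := by
  unfold flatten_slices flatten_slices_alt
  simp only []
  set n := matrix.length with hn
  set m := matrix.headI.length with hm
  by_cases hm0 : 0 < m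
  · have hn0 : 0 < n := by
      rw [hn]
      by_contra h
      have hnil : matrix = [] := List.length_eq_zero_iff.mp (by omega)
      rw [hnil] at hm
      rw [hm] at hm0
      exact absurd hm0 (by decide)
    obtain ⟨L1, L2, L3, C, D, A⟩ := outer_spec matrix n m hm0 n (le_refl n)
    set st := (List.range n).foldl (rowPass n m matrix)
      (List.replicate m [], List.replicate (n + m - 1) [], List.replicate (n + m - 1) [])
      with hst
    have hcols : st.1 = (List.range m).map (fun c => colC matrix n c) :=
      list_eq_map_range _ _ _ L1 C
    have hdiags : st.2.1 = (List.range (n + m - 1)).map (fun k => diagC matrix m n k) :=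
      list_eq_map_range _ _ _ L2 D
    have hantis : st.2.2 = (List.range (n + m - 1)).map (fun k => antiC matrix n m n k) :=
      list_eq_map_range _ _ _ L3 A
    have hfd : st.2.1.filter (fun b => b ≠ []) = st.2.1 := by
      rw [hdiags]
      apply List.filter_eq_self.mpr
      intro b hb
      obtain ⟨k, hk, hbk⟩ := List.mem_map.mp hb
      rw [List.mem_range] at hk
      subst hbk
      simpa using diagC_ne_nil matrix n m k hn0 hm0 hk
    have hfa : st.2.2.filter (fun b => b ≠ []) = st.2.2 := by
      rw [hantis]
      apply List.filter_eq_self.mpr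
      intro b hb
      obtain ⟨k, hk, hbk⟩ := List.mem_map.mp hb
      rw [List.mem_range] at hk
      subst hbk
      simpa using antiC_ne_nil matrix n m k hn0 hm0 hk
    rw [PySem.List.foldl_append_singleton_eq_map (fun (row : List String) => row) matrix]
    rw [PySem.List.foldl_append_singleton_eq_map]
    rw [PySem.List.foldl_congr_mem (List.range (n + m - 1)) _
      (fun acc d => acc ++ [diagC matrix m n d]) _
      (fun acc d hd => by
        rw [diagLoopA_eq_diagC matrix n m d]
        rw [if_pos (diagC_ne_nil matrix n m d hn0 hm0 (List.mem_range.mp hd))])]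
    rw [PySem.List.foldl_append_singleton_eq_map]
    rw [pyRange_anti n m hn0 hm0, List.foldl_map]
    rw [PySem.List.foldl_congr_mem (List.range (n + m - 1)) _
      (fun acc k => acc ++ [antiC matrix n m n k]) _
      (fun acc k hk => by
        rw [antiLoopA_eq_antiC matrix n m k]
        rw [if_pos (antiC_ne_nil matrix n m k hn0 hm0 (List.mem_range.mp hk))])]
    rw [PySem.List.foldl_append_singleton_eq_map]
    rw [hfd, hfa, hcols, hdiags, hantis]
    have hcongr : (fun c => colC matrix n c)
        = (fun col => (List.range n).map (fun row => (matrix.getD row []).getD col "")) := by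
      funext c; rfl
    rw [hcongr]
    simp [List.append_assoc]
  · have hmz : m = 0 := by omega
    have hrp : ∀ st r, rowPass n m matrix st r = st := by
      intro st r
      rw [rowPass, hmz]
      rfl
    have hfold : ∀ (l : List Nat)
        (s : List (List String) × List (List String) × List (List String)),
        l.foldl (rowPass n m matrix) s = s := by
      intro l
      induction l with
      | nil => intro s; rfl
      | cons a t iht => intro s; rw [List.foldl_cons, hrp]; exact iht s
    rw [hfold]
    rw [PySem.List.foldl_append_singleton_eq_map (fun (row : List String) => row) matrix]
    rw [PySem.List.foldl_congr_mem (List.range (n + m - 1)) _ (fun acc d => acc) _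
      (fun acc d _ => by rw [hmz, diagLoopA_zero]; simp)]
    rw [PySem.List.foldl_congr_mem (PySem.List.pyRange (-((n : Int) - 1)) (m : Int) 1) _
      (fun acc d => acc) _
      (fun acc d _ => by rw [hmz, antiLoopA_zero]; simp)]
    simp [hmz]

-- ===== VERDICT (by name: the statement is the Claim_ definition above) =====
theorem flatten_slices_spec : Claim_equal_flatten_slices := by
  intro matrix _ _
  unfold Spec_flatten_slices
  exact flatten_slices_eq matrix
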